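-- pv_equiv track=rewrite | github.com/joshanashakya/dissertation | workspace/dataset/java-python/GeeksForGeeks/3940/A/2.py | maxTeams
-- ===== SOURCE A (Python) =====
-- def maxTeams(N1, N2):
--
--
--     count = 0
--
--     # While it is possible to form a team
--     while (N1 > 0 and N2 > 0 and N1 + N2 >= 3) :
--
--         # Choose 2 memebers from group 1
--         # and a single memeber from group 2
--         if (N1 > N2):
--             N1 -= 2
--             N2 -= 1
--
--
--         # Choose 2 memebers from group 2
--         # and a single memeber from group 1
--         else:
--             N1 -= 1
--             N2 -= 2
--
--
--         # Update the count
--         count=count+1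
--
--
--     # Return the count
--     return count
-- ===== SOURCE B (Python) =====
-- def maxTeams(N1, N2):
--     # Closed form: each team uses 3 people, at least one from each group.
--     return max(0, min(N1, N2, (N1 + N2) // 3))
-- ===== Notes on version B (the rewrite author's own statement) =====
-- stated objective: faster
-- what changed: Replaced the greedy one-team-at-a-time while loop with the closed form max(0, min(N1, N2, (N1+N2)//3)).
import Mathlib
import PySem

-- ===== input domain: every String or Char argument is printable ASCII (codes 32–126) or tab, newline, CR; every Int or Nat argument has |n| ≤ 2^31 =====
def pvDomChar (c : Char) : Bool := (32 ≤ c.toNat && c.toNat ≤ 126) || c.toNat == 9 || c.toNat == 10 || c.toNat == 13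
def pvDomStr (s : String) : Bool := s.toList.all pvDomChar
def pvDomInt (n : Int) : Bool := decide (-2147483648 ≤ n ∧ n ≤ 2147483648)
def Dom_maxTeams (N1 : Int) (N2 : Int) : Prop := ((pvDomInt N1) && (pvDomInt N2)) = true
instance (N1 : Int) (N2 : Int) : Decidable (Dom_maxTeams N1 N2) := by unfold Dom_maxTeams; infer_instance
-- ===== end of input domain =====

-- B replaces A's greedy while loop with a closed form (faster: O(1) vs O(N1+N2)).

-- ===== PORT A =====
-- A's while loop, transcribed as structural recursion on the same state.
def maxTeamsLoop (N1 : Int) (N2 : Int) (count : Int) : Int :=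
  if N1 > 0 ∧ N2 > 0 ∧ N1 + N2 ≥ 3 then
    if N1 > N2 then maxTeamsLoop (N1 - 2) (N2 - 1) (count + 1)
    else maxTeamsLoop (N1 - 1) (N2 - 2) (count + 1)
  else count
termination_by (N1 + N2).toNat
decreasing_by all_goals omega

def maxTeams (N1 : Int) (N2 : Int) : Int := maxTeamsLoop N1 N2 0

-- ===== PORT B =====
def maxTeams_alt (N1 : Int) (N2 : Int) : Int :=
  max 0 (min N1 (min N2 (PySem.Int.floordiv (N1 + N2) 3)))

-- ===== PRECONDITION & SPEC =====
def Spec_maxTeams (N1 : Int) (N2 : Int) (out : Int) : Prop := out = maxTeams_alt N1 N2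
instance (N1 : Int) (N2 : Int) (out : Int) : Decidable (Spec_maxTeams N1 N2 out) := by unfold Spec_maxTeams; infer_instance

-- ===== CLAIM (what is proved, stated in full; the proofs are below) =====
def Claim_equal_maxTeams : Prop := ∀ (N1 : Int) (N2 : Int), Dom_maxTeams N1 N2 → Spec_maxTeams N1 N2 (maxTeams N1 N2)

-- ===== LEMMAS AND PROOFS =====

theorem fdiv3 (a : Int) : Int.fdiv a 3 = a / 3 := by
  rw [Int.fdiv_eq_ediv]; simp

theorem maxTeamsLoop_closed (n : Nat) : ∀ (N1 N2 count : Int), (N1 + N2).toNat ≤ n →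
    maxTeamsLoop N1 N2 count = count + max 0 (min N1 (min N2 (PySem.Int.floordiv (N1 + N2) 3))) := by
  induction n with
  | zero =>
    intro N1 N2 count h
    rw [maxTeamsLoop]
    have : ¬ (N1 > 0 ∧ N2 > 0 ∧ N1 + N2 ≥ 3) := by omega
    rw [if_neg this]
    simp only [PySem.Int.floordiv, fdiv3]
    omega
  | succ n ih =>
    intro N1 N2 count h
    rw [maxTeamsLoop]
    by_cases hc : N1 > 0 ∧ N2 > 0 ∧ N1 + N2 ≥ 3
    · rw [if_pos hc]
      by_cases hg : N1 > N2
      · rw [if_pos hg, ih (N1 - 2) (N2 - 1) (count + 1) (by omega)]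
        simp only [PySem.Int.floordiv, fdiv3]
        have h3 : N1 - 2 + (N2 - 1) = (N1 + N2) - 1 * 3 := by ring
        rw [h3, Int.sub_mul_ediv_right _ 1 (by omega)]
        omega
      · rw [if_neg hg, ih (N1 - 1) (N2 - 2) (count + 1) (by omega)]
        simp only [PySem.Int.floordiv, fdiv3]
        have h3 : N1 - 1 + (N2 - 2) = (N1 + N2) - 1 * 3 := by ring
        rw [h3, Int.sub_mul_ediv_right _ 1 (by omega)]
        omega
    · rw [if_neg hc]
      simp only [PySem.Int.floordiv, fdiv3]
      omega

-- ===== VERDICT (by name: the statement is the Claim_ definition above) =====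
theorem maxTeams_spec : Claim_equal_maxTeams := by
  intro N1 N2 _
  unfold Spec_maxTeams maxTeams maxTeams_alt
  rw [maxTeamsLoop_closed (N1 + N2).toNat N1 N2 0 le_rfl]
  ring
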